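-- pv_equiv track=rewrite | github.com/faisal-rasool/codility-java-practice | src/main/resources/FirstRound/solutions-hammad/3.py | solution
-- ===== SOURCE A (Python) =====
-- def solution(s: str) -> bool:
--
--     reachedB = False
--     for i in range(0,len(s)):
--         if s[i] == 'b':              # iterating until we find the first 'b'
--             reachedB = True
--         if reachedB and s[i] == 'a': # after that if we find an 'a' return false
--             return False
--
--     # else return true
--     return True
-- ===== SOURCE B (Python) =====
-- def solution(s: str) -> bool:
--     ab = [c for c in s if c == 'a' or c == 'b']
--     return ab == sorted(ab)
-- ===== Notes on version B (the rewrite author's own statement) =====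
-- stated objective: alternative
-- what changed: Instead of a stateful scan, B projects the string onto its 'a'/'b' characters and checks that this projection is already sorted (all 'a's before all 'b's), via a filter plus a sort-and-compare.
import Mathlib
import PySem

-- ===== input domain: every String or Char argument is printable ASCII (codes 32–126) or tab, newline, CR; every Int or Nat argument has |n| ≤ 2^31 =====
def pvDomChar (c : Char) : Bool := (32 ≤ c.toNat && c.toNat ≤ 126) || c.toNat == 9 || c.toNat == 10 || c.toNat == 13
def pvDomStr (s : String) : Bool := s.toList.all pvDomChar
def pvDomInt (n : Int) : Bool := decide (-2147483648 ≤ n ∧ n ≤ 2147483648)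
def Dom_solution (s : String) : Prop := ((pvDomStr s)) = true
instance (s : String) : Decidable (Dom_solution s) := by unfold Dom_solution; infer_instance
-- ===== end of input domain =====

-- B replaces A's single stateful flag loop by a different algorithm: project the string onto its
-- 'a'/'b' characters and check that projection is already sorted. Objective: alternative.

-- ===== PORT A =====
-- the loop over i in range(len(s)) with the reachedB flag, as structural recursion over the characters
def solutionGo : List Char → Bool → Bool
  | [], _ => true
  | c :: rest, reachedB =>
      let r := if c = 'b' then true else reachedB
      if r && c = 'a' then false else solutionGo rest r

def solution (s : String) : Bool := solutionGo s.toList false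

-- ===== PORT B =====
def solution_alt (s : String) : Bool :=
  let ab := s.toList.filter (fun c => c == 'a' || c == 'b')
  ab == PySem.List.sorted ab (fun x => x) false

-- ===== PRECONDITION & SPEC =====
def Spec_solution (s : String) (out : Bool) : Prop := out = solution_alt s
instance (s : String) (out : Bool) : Decidable (Spec_solution s out) := by unfold Spec_solution; infer_instance

-- ===== CLAIM (what is proved, stated in full; the proofs are below) =====
def Claim_equal_solution : Prop := ∀ (s : String), Dom_solution s → Spec_solution s (solution s)

-- ===== LEMMAS AND PROOFS =====

theorem solutionGo_true (cs : List Char) : solutionGo cs true = !cs.contains 'a' := by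
  induction cs with
  | nil => simp [solutionGo]
  | cons c rest ih =>
      by_cases hc : c = 'a'
      · simp [solutionGo, hc]
      · simp only [solutionGo, ite_self, Bool.true_and]
        rw [if_neg (by simpa using hc), ih, List.contains_cons]
        simp [Ne.symm hc]

theorem mem_filter_ab (c : Char) (cs : List Char)
    (h : c ∈ cs.filter (fun c => c == 'a' || c == 'b')) : c = 'a' ∨ c = 'b' := by
  have := (List.mem_filter.mp h).2
  simpa using this

-- a list containing only 'a'/'b' chars is Pairwise (≤) iff A's scan accepts it
theorem solutionGo_eq_pairwise (cs : List Char) :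
    solutionGo cs false
      = decide ((cs.filter (fun c => c == 'a' || c == 'b')).Pairwise (· ≤ ·)) := by
  induction cs with
  | nil => simp [solutionGo]
  | cons c rest ih =>
      by_cases hb : c = 'b'
      · subst hb
        have hstep : solutionGo ('b' :: rest) false = solutionGo rest true := by
          simp [solutionGo]
        rw [hstep, solutionGo_true]
        have hf : ('b' :: rest).filter (fun c => c == 'a' || c == 'b')
            = 'b' :: rest.filter (fun c => c == 'a' || c == 'b') := by simp
        rw [hf]
        by_cases ha : 'a' ∈ rest
        · have hmem : 'a' ∈ rest.filter (fun c => c == 'a' || c == 'b') := by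
            exact List.mem_filter.mpr ⟨ha, by decide⟩
          have : ¬ ('b' :: rest.filter (fun c => c == 'a' || c == 'b')).Pairwise (· ≤ ·) := by
            intro hp
            have := (List.pairwise_cons.mp hp).1 'a' hmem
            exact absurd this (by decide)
          simp [ha, this]
        · have hall : ∀ x ∈ rest.filter (fun c => c == 'a' || c == 'b'), x = 'b' := by
            intro x hx
            rcases mem_filter_ab x rest hx with h1 | h2
            · exact absurd (h1 ▸ (List.mem_filter.mp hx).1) ha
            · exact h2
          have hp : ('b' :: rest.filter (fun c => c == 'a' || c == 'b')).Pairwise (· ≤ ·) := by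
            apply List.pairwise_of_forall_mem_list
            intro x hx y hy
            have hx' : x = 'b' := by
              rcases List.mem_cons.mp hx with h | h
              · exact h
              · exact hall x h
            have hy' : y = 'b' := by
              rcases List.mem_cons.mp hy with h | h
              · exact h
              · exact hall y h
            rw [hx', hy']
          simp [ha, hp]
      · have hstep : solutionGo (c :: rest) false = solutionGo rest false := by
          by_cases ha : c = 'a' <;> simp [solutionGo, hb, ha]
        rw [hstep, ih]
        by_cases ha : c = 'a'
        · subst ha
          have hf : ('a' :: rest).filter (fun c => c == 'a' || c == 'b')
              = 'a' :: rest.filter (fun c => c == 'a' || c == 'b') := by simp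
          rw [hf]
          have : ('a' :: rest.filter (fun c => c == 'a' || c == 'b')).Pairwise (· ≤ ·)
              ↔ (rest.filter (fun c => c == 'a' || c == 'b')).Pairwise (· ≤ ·) := by
            constructor
            · intro hp; exact (List.pairwise_cons.mp hp).2
            · intro hp
              refine List.pairwise_cons.mpr ⟨?_, hp⟩
              intro x hx
              rcases mem_filter_ab x rest hx with h | h <;> rw [h] <;> decide
          simp [this]
        · have hf : (c :: rest).filter (fun c => c == 'a' || c == 'b')
              = rest.filter (fun c => c == 'a' || c == 'b') := by
            simp [ha, hb]
          rw [hf]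

theorem sorted_eq_self_iff_pairwise (l : List Char) :
    (l == PySem.List.sorted l (fun x => x) false) = decide (l.Pairwise (· ≤ ·)) := by
  by_cases hp : l.Pairwise (· ≤ ·)
  · have : PySem.List.sorted l (fun x => x) false = l :=
      PySem.List.sorted_eq_self_of_pairwise l (fun x => x) (by simpa using hp)
    simp [this, hp]
  · have hne : l ≠ PySem.List.sorted l (fun x => x) false := by
      intro he
      apply hp
      have := PySem.List.sorted_pairwise l (fun x => x)
      rw [← he] at this
      simpa using this
    simp [hp, beq_eq_false_iff_ne.mpr hne]

-- ===== VERDICT (by name: the statement is the Claim_ definition above) =====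
theorem solution_spec : Claim_equal_solution := by
  intro s _
  unfold Spec_solution solution solution_alt
  rw [solutionGo_eq_pairwise, sorted_eq_self_iff_pairwise]
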